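-- pv_equiv track=rewrite | github.com/UtkarshVerma-IITB/PhD_work | DDIC_simulation_over_time_mul_rep.py | compatible_edges_DD
-- ===== SOURCE A (Python) =====
-- def compatible_edges_DD(recipient_bg,DD_bg):
-- 	Edges=[]
-- 	WL_bg=DD_bg
-- 	k=len(DD_bg)
-- 	l=len(recipient_bg)
-- 	for i in range(len(DD_bg)):
-- 		for j in range(len(recipient_bg)):
-- 			#print ('i,j',i+len(recipient_bg),j)
-- 			if (DD_bg[i]==recipient_bg[j] and DD_bg[i]!="Matched" and recipient_bg[j]!="Matched"):
-- 				Edges.append((i+len(recipient_bg),j,2))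
-- 				continue
--
-- 	for i in range(len(DD_bg)):
-- 		for j in range(len(WL_bg)):
-- 			if (DD_bg[i]==WL_bg[j] and DD_bg[i]!='Matched' and WL_bg[j]!='Matched'):
-- 				Edges.append((l+i,k+l+j,1))
-- 				continue
-- 	return Edges
-- ===== SOURCE B (Python) =====
-- def _bucket(xs):
--     b = {}
--     for j, v in enumerate(xs):
--         if v != "Matched":
--             b[v] = b.get(v, []) + [j]
--     return b
--
--
-- def compatible_edges_DD(recipient_bg, DD_bg):
--     Edges = []
--     k = len(DD_bg)
--     l = len(recipient_bg)
--     rb = _bucket(recipient_bg)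
--     for i, v in enumerate(DD_bg):
--         if v != "Matched":
--             Edges.extend((i + l, j, 2) for j in rb.get(v, []))
--     db = _bucket(DD_bg)
--     for i, v in enumerate(DD_bg):
--         if v != "Matched":
--             Edges.extend((l + i, k + l + j, 1) for j in db.get(v, []))
--     return Edges
-- ===== Notes on version B (the rewrite author's own statement) =====
-- stated objective: alternative
-- what changed: Replaces the nested donor-recipient scans with blood-group index buckets (a dict of in-order index lists) built once; each donor then emits its edges by a single dict lookup instead of rescanning the list.
import Mathlib
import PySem

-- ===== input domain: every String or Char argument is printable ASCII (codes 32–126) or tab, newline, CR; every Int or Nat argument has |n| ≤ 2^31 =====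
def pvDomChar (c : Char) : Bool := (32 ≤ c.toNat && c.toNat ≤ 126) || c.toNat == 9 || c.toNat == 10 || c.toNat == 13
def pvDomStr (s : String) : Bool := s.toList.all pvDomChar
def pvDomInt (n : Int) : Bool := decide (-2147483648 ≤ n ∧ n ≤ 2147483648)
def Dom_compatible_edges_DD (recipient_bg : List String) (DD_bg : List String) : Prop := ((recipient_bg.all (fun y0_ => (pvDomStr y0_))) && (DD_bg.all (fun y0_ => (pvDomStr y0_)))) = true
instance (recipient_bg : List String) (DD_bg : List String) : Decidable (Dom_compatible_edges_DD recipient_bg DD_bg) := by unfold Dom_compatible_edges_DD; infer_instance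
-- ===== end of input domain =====

-- B replaces the nested donor×recipient scans with blood-group buckets (dict of in-order
-- index lists) built once, so each donor emits its edges by a single lookup.

-- ===== PORT A =====
def compatible_edges_DD (recipient_bg : List String) (DD_bg : List String) : List (Int × Int × Int) :=
  let Edges : List (Int × Int × Int) := []
  let WL_bg := DD_bg
  let k := PySem.List.len DD_bg
  let l := PySem.List.len recipient_bg
  let Edges :=
    (PySem.List.pyRange 0 (PySem.List.len DD_bg) 1).foldl (fun E i =>
      (PySem.List.pyRange 0 (PySem.List.len recipient_bg) 1).foldl (fun E j =>
        if (PySem.List.pyGetD DD_bg i "" == PySem.List.pyGetD recipient_bg j "") &&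
           (PySem.List.pyGetD DD_bg i "" != "Matched") &&
           (PySem.List.pyGetD recipient_bg j "" != "Matched")
        then E ++ [(i + PySem.List.len recipient_bg, j, 2)] else E) E) Edges
  (PySem.List.pyRange 0 (PySem.List.len DD_bg) 1).foldl (fun E i =>
    (PySem.List.pyRange 0 (PySem.List.len WL_bg) 1).foldl (fun E j =>
      if (PySem.List.pyGetD DD_bg i "" == PySem.List.pyGetD WL_bg j "") &&
         (PySem.List.pyGetD DD_bg i "" != "Matched") &&
         (PySem.List.pyGetD WL_bg j "" != "Matched")
      then E ++ [(l + i, k + l + j, 1)] else E) E) Edges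

-- ===== PORT B =====
-- Source B's _bucket: 'b[v] = b.get(v, []) + [j]' is Dict.modify v [] (· ++ [j])
def pvBucket (xs : List String) : PySem.Dict String (List Int) :=
  (PySem.List.enumerate xs 0).foldl (fun b p =>
    if p.2 != "Matched" then b.modify p.2 [] (· ++ [p.1]) else b) PySem.Dict.empty

def compatible_edges_DD_alt (recipient_bg : List String) (DD_bg : List String) : List (Int × Int × Int) :=
  let k := PySem.List.len DD_bg
  let l := PySem.List.len recipient_bg
  let rb := pvBucket recipient_bg
  let Edges : List (Int × Int × Int) :=
    (PySem.List.enumerate DD_bg 0).foldl (fun E p =>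
      if p.2 != "Matched" then E ++ (rb.getD p.2 []).map (fun j => (p.1 + l, j, 2)) else E) []
  let db := pvBucket DD_bg
  (PySem.List.enumerate DD_bg 0).foldl (fun E p =>
    if p.2 != "Matched" then E ++ (db.getD p.2 []).map (fun j => (l + p.1, k + l + j, 1)) else E) Edges

-- ===== PRECONDITION & SPEC =====
def Spec_compatible_edges_DD (recipient_bg : List String) (DD_bg : List String) (out : List (Int × Int × Int)) : Prop := out = compatible_edges_DD_alt recipient_bg DD_bg
instance (recipient_bg : List String) (DD_bg : List String) (out : List (Int × Int × Int)) : Decidable (Spec_compatible_edges_DD recipient_bg DD_bg out) := by unfold Spec_compatible_edges_DD; infer_instance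

-- ===== CLAIM (what is proved, stated in full; the proofs are below) =====
def Claim_equal_compatible_edges_DD : Prop := ∀ (recipient_bg : List String) (DD_bg : List String), Dom_compatible_edges_DD recipient_bg DD_bg → Spec_compatible_edges_DD recipient_bg DD_bg (compatible_edges_DD recipient_bg DD_bg)

-- ===== LEMMAS AND PROOFS =====

-- the bucket for v holds exactly the in-order indices j with xs[j] = v, for any v ≠ "Matched"
theorem pvBucket_getD (xs : List String) (v : String) :
    (pvBucket xs).getD v [] =
      (PySem.List.pyRange 0 (PySem.List.len xs) 1).filter
        (fun j => (PySem.List.pyGetD xs j "" != "Matched") && (PySem.List.pyGetD xs j "" == v)) := by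
  unfold pvBucket
  rw [← List.foldl_filter,
      show (List.foldl (fun b (p : Int × String) => b.modify p.2 [] (· ++ [p.1])) PySem.Dict.empty
          (List.filter (fun p => p.2 != "Matched") (PySem.List.enumerate xs 0)))
        = (List.foldl (fun b (q : String × Int) => b.modify q.1 [] (· ++ [q.2])) PySem.Dict.empty
          (((PySem.List.enumerate xs 0).filter (fun p => p.2 != "Matched")).map (fun p => (p.2, p.1))))
        from @List.foldl_map (Int × String) (String × Int) (PySem.Dict String (List Int))
          (fun p => (p.2, p.1)) (fun b q => b.modify q.1 [] (· ++ [q.2])) _ _ |>.symm,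
      PySem.Dict.getD_foldl_modify_append]
  simp [List.filter_map, List.map_map, Function.comp_def]
  rw [PySem.List.enumerate_eq_map_pyRange (d := "")]
  simp [List.filter_map, List.map_map, Function.comp_def, Bool.and_comm]

-- B's per-donor bucket lookup equals A's inner filtered scan
theorem perDonor (xs : List String) (v : String) (f : Int → Int × Int × Int) :
    (if v != "Matched" then ((pvBucket xs).getD v []).map f else [])
      = ((PySem.List.pyRange 0 (PySem.List.len xs) 1).filter
          (fun j => (v == PySem.List.pyGetD xs j "") && (v != "Matched") &&
                    (PySem.List.pyGetD xs j "" != "Matched"))).map f := by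
  by_cases hv : v = "Matched"
  · simp [hv]
  · rw [if_pos (by simp [hv]), pvBucket_getD]
    congr 1
    apply List.filter_congr
    intro j _
    by_cases hw : PySem.List.pyGetD xs j "" = v
    · rw [hw]; simp
    · have h1 : (v == PySem.List.pyGetD xs j "") = false := by simp [Ne.symm hw]
      have h2 : (PySem.List.pyGetD xs j "" == v) = false := by simp [hw]
      simp [h1, h2]

-- B's extend-if loop is a flatMap
theorem foldl_extend_if {α β : Type} (l : List α) (c : α → Bool) (g : α → List β) (init : List β) :
    l.foldl (fun E p => if c p then E ++ g p else E) init
      = init ++ l.flatMap (fun p => if c p then g p else []) := by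
  induction l generalizing init with
  | nil => simp
  | cons x xs ih => simp [ih]; split <;> simp

theorem compatible_edges_DD_eq (recipient_bg DD_bg : List String) :
    compatible_edges_DD recipient_bg DD_bg = compatible_edges_DD_alt recipient_bg DD_bg := by
  unfold compatible_edges_DD compatible_edges_DD_alt
  simp only [PySem.List.foldl_append_if, foldl_extend_if, PySem.List.foldl_append_eq_flatMap,
    List.nil_append]
  rw [PySem.List.enumerate_eq_map_pyRange (xs := DD_bg) (d := "")]
  simp only [List.flatMap_map]
  congr 1
  · exact List.flatMap_congr (fun i _ => (perDonor recipient_bg (PySem.List.pyGetD DD_bg i "")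
      (fun j => (i + PySem.List.len recipient_bg, j, 2))).symm)
  · exact List.flatMap_congr (fun i _ => (perDonor DD_bg (PySem.List.pyGetD DD_bg i "")
      (fun j => (PySem.List.len recipient_bg + i, PySem.List.len DD_bg + PySem.List.len recipient_bg + j, 1))).symm)

-- ===== VERDICT (by name: the statement is the Claim_ definition above) =====
theorem compatible_edges_DD_spec : Claim_equal_compatible_edges_DD := by
  intro recipient_bg DD_bg _
  unfold Spec_compatible_edges_DD
  exact compatible_edges_DD_eq recipient_bg DD_bg
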